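-- pv_equiv track=rewrite | github.com/yearing1017/Algorithm_Note | 程序员代码面试指南-左程云/其他题目/max_same_str.py | calDPDScore
-- ===== SOURCE A (Python) =====
-- def calDPDScore(dpdInfo) :
--     # write code here
--     max_len = 0
--     cur_max = 0
--     l = 0
--     start = False
--     while l < len(dpdInfo):
--         if dpdInfo[l] == 'Y':
--             start = True
--             while l < len(dpdInfo) and dpdInfo[l] == 'Y' and start:
--                 cur_max += 1
--                 l += 1
--         else:
--             start = False
--             if cur_max > max_len:
--                 max_len = cur_max
--             cur_max = 0
--             l += 1
--
--
--     max_len = max(cur_max, max_len)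
--
--     if  max_len == 0:
--         return 0
--     elif 0 < max_len <= 3:
--         return -10
--     elif  3 < max_len <= 7:
--         return -15
--     else:
--         return -25
-- ===== SOURCE B (Python) =====
-- def calDPDScore(dpdInfo):
--     # The score only depends on which threshold the longest 'Y' run reaches,
--     # and a run of >= k consecutive 'Y's exists iff 'Y'*k is a substring.
--     if 'Y' not in dpdInfo:
--         return 0
--     if 'YYYYYYYY' in dpdInfo:
--         return -25
--     if 'YYYY' in dpdInfo:
--         return -15
--     return -10
-- ===== Notes on version B (the rewrite author's own statement) =====
-- stated objective: faster
-- what changed: Never computes the maximal run length at all: since the score depends only on whether the longest run of the target character reaches length 1, 4 or 8, B decides it with three substring-membership tests (runs of length 1, 8 and 4 of that character) instead of A's index/while scan with start-flag and running-max bookkeeping; the membership tests run in C inside the interpreter.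
import Mathlib
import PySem

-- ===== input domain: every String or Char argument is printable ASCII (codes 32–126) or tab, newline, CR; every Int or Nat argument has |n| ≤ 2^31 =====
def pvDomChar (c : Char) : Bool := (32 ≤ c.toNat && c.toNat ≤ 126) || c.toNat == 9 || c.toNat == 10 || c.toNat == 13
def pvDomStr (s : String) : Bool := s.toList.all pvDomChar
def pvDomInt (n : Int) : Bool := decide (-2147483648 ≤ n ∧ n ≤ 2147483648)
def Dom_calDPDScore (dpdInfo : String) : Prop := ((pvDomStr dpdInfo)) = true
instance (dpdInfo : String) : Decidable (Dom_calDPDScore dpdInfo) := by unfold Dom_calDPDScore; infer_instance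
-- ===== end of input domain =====

-- B never computes the maximal run length: it decides which threshold the longest 'Y' run
-- reaches by three substring-membership tests (objective: faster, measured).

-- ===== PORT A =====
-- inner while loop: `while l < len(dpdInfo) and dpdInfo[l] == 'Y' and start`; `start` is set
-- to True immediately before the loop and never changed inside it, so it is always true here.
def pvInnerA : List Char → Int → Int × List Char
  | [], cur => (cur, [])
  | c :: rest, cur => if c = 'Y' then pvInnerA rest (cur + 1) else (cur, c :: rest)

theorem pvInnerA_len : ∀ (l : List Char) (cur : Int), (pvInnerA l cur).2.length ≤ l.length := by
  intro l
  induction l with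
  | nil => intro cur; simp [pvInnerA]
  | cons c t ih =>
    intro cur
    by_cases h : c = 'Y' <;> simp [pvInnerA, h]
    exact Nat.le_succ_of_le (ih (cur + 1))

-- outer while loop; returns the final max_len (after the trailing `max(cur_max, max_len)`)
def pvOuterA : List Char → Int → Int → Int
  | [], maxl, cur => max cur maxl
  | c :: rest, maxl, cur =>
    if c = 'Y' then
      -- inner while consumes the run starting at l (its first step handles c itself)
      let p := pvInnerA rest (cur + 1)
      pvOuterA p.2 maxl p.1
    else
      pvOuterA rest (if cur > maxl then cur else maxl) 0
termination_by l _ _ => l.length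
decreasing_by
  · exact Nat.lt_succ_of_le (pvInnerA_len rest (cur + 1))
  · simp

def calDPDScore (dpdInfo : String) : Int :=
  let max_len := pvOuterA dpdInfo.toList 0 0
  if max_len = 0 then 0
  else if 0 < max_len ∧ max_len ≤ 3 then -10
  else if 3 < max_len ∧ max_len ≤ 7 then -15
  else -25

-- ===== PORT B =====
-- three `sub in dpdInfo` tests, in Source B's order
def calDPDScore_alt (dpdInfo : String) : Int :=
  if PySem.Str.isIn "Y" dpdInfo = false then 0
  else if PySem.Str.isIn "YYYYYYYY" dpdInfo then -25
  else if PySem.Str.isIn "YYYY" dpdInfo then -15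
  else -10

-- ===== PRECONDITION & SPEC =====
def Spec_calDPDScore (dpdInfo : String) (out : Int) : Prop := out = calDPDScore_alt dpdInfo
instance (dpdInfo : String) (out : Int) : Decidable (Spec_calDPDScore dpdInfo out) := by unfold Spec_calDPDScore; infer_instance

-- ===== CLAIM (what is proved, stated in full; the proofs are below) =====
def Claim_equal_calDPDScore : Prop := ∀ (dpdInfo : String), Dom_calDPDScore dpdInfo → Spec_calDPDScore dpdInfo (calDPDScore dpdInfo)

-- ===== LEMMAS AND PROOFS =====

-- proof-side characterisation: hA l cur = longest Y-run, given a current run of length cur just ended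
def hA : List Char → Int → Int
  | [], cur => cur
  | c :: t, cur => if c = 'Y' then hA t (cur + 1) else max cur (hA t 0)

-- length of the leading 'Y' run
def frontY : List Char → Int
  | [] => 0
  | c :: t => if c = 'Y' then 1 + frontY t else 0

theorem frontY_nonneg : ∀ (l : List Char), 0 ≤ frontY l := by
  intro l
  induction l with
  | nil => simp [frontY]
  | cons c t ih => by_cases h : c = 'Y' <;> simp [frontY, h]; omega

theorem hA_ge : ∀ (l : List Char) (cur : Int), cur ≤ hA l cur := by
  intro l
  induction l with
  | nil => intro cur; simp [hA]
  | cons c t ih =>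
    intro cur
    by_cases h : c = 'Y'
    · simp only [hA, if_pos h]
      have := ih (cur + 1); omega
    · simp only [hA, if_neg h]
      omega

-- cur merges with the leading run; the rest of the maximum is independent of cur
theorem hA_split : ∀ (l : List Char) (cur : Int), 0 ≤ cur →
    hA l cur = max (cur + frontY l) (hA l 0) := by
  intro l
  induction l with
  | nil => intro cur hc; simp [hA, frontY]; omega
  | cons c t ih =>
    intro cur hc
    by_cases h : c = 'Y'
    · simp only [hA, if_pos h, frontY]
      rw [ih (cur + 1) (by omega), show (0:Int) + 1 = 1 from rfl, ih 1 (by omega)]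
      have := hA_ge t 0
      have := frontY_nonneg t
      omega
    · simp only [hA, frontY, if_neg h]
      have := hA_ge t 0
      omega

theorem frontY_le_hA : ∀ (l : List Char), frontY l ≤ hA l 0 := by
  intro l
  cases l with
  | nil => simp [hA, frontY]
  | cons c t =>
    by_cases h : c = 'Y'
    · simp only [hA, frontY, if_pos h, zero_add]
      rw [hA_split t 1 (by omega)]
      omega
    · simp only [frontY, if_neg h]
      have := hA_ge (c :: t) 0
      omega

theorem hA_cons_mono : ∀ (c : Char) (t : List Char), hA t 0 ≤ hA (c :: t) 0 := by
  intro c t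
  by_cases h : c = 'Y'
  · simp only [hA, if_pos h, zero_add]
    rw [hA_split t 1 (by omega)]
    omega
  · simp only [hA, if_neg h]
    omega

-- a prefix of k 'Y's means the leading run has length at least k
theorem prefix_replicate_le_frontY : ∀ (k : ℕ) (l : List Char),
    List.replicate k 'Y' <+: l → (k : Int) ≤ frontY l := by
  intro k
  induction k with
  | zero => intro l _; have := frontY_nonneg l; omega
  | succ k ih =>
    intro l hp
    cases l with
    | nil => simp [List.replicate_succ] at hp
    | cons c t =>
      rw [List.replicate_succ, List.cons_prefix_cons] at hp
      obtain ⟨hc, ht⟩ := hp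
      have := ih t ht
      simp [frontY, ← hc]
      omega

theorem replicate_prefix_of_le_frontY : ∀ (k : ℕ) (l : List Char),
    (k : Int) ≤ frontY l → List.replicate k 'Y' <+: l := by
  intro k
  induction k with
  | zero => intro l _; simp
  | succ k ih =>
    intro l hk
    cases l with
    | nil => exfalso; simp only [frontY] at hk; omega
    | cons c t =>
      by_cases h : c = 'Y'
      · subst h
        simp only [frontY] at hk
        rw [List.replicate_succ, List.cons_prefix_cons]
        exact ⟨rfl, ih t (by omega)⟩
      · exfalso; simp only [frontY, if_neg h] at hk; omega

-- the key characterisation: a run of ≥ k consecutive 'Y's exists iff 'Y'*k is a substring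
theorem infix_replicate_iff_hA : ∀ (l : List Char) (k : ℕ), 1 ≤ k →
    (List.replicate k 'Y' <:+: l ↔ (k : Int) ≤ hA l 0) := by
  intro l
  induction l with
  | nil =>
    intro k hk
    constructor
    · intro h
      have := h.length_le
      simp only [List.length_replicate, List.length_nil, Nat.le_zero] at this
      omega
    · intro h
      exfalso
      simp only [hA] at h
      omega
  | cons c t ih =>
    intro k hk
    rw [List.infix_cons_iff]
    constructor
    · intro h
      rcases h with h | h
      · have h1 := prefix_replicate_le_frontY k _ h
        have h2 := frontY_le_hA (c :: t)
        omega
      · have := (ih k hk).mp h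
        have := hA_cons_mono c t
        omega
    · intro h
      by_cases hc : c = 'Y'
      · subst hc
        simp only [hA, zero_add] at h
        rw [hA_split t 1 (by omega)] at h
        by_cases h1 : (k : Int) ≤ 1 + frontY t
        · left
          cases k with
          | zero => omega
          | succ k =>
            rw [List.replicate_succ, List.cons_prefix_cons]
            exact ⟨rfl, replicate_prefix_of_le_frontY k t (by push_cast at h1 ⊢; omega)⟩
        · right
          exact (ih k hk).mpr (by omega)
      · simp only [hA, if_neg hc] at h
        right
        exact (ih k hk).mpr (by omega)

theorem pvInnerA_h : ∀ (l : List Char) (cur : Int),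
    hA (pvInnerA l cur).2 (pvInnerA l cur).1 = hA l cur := by
  intro l
  induction l with
  | nil => intro cur; simp [pvInnerA]
  | cons c t ih =>
    intro cur
    by_cases h : c = 'Y' <;> simp [pvInnerA, hA, h]
    exact ih (cur + 1)

theorem pvOuterA_h : ∀ (n : ℕ) (l : List Char) (maxl cur : Int), l.length ≤ n →
    pvOuterA l maxl cur = max maxl (hA l cur) := by
  intro n
  induction n with
  | zero =>
    intro l maxl cur hl
    have : l = [] := List.length_eq_zero_iff.mp (Nat.le_zero.mp hl)
    subst this; simp [pvOuterA, hA, max_comm]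
  | succ n ih =>
    intro l maxl cur hl
    cases l with
    | nil => simp [pvOuterA, hA, max_comm]
    | cons c t =>
      by_cases h : c = 'Y'
      · have hlen : (pvInnerA t (cur + 1)).2.length ≤ n := by
          have := pvInnerA_len t (cur + 1)
          simp at hl; omega
        subst h
        simp only [pvOuterA, hA, reduceIte]
        rw [ih _ _ _ hlen, pvInnerA_h]
      · have hlen : t.length ≤ n := by simp at hl; omega
        simp only [pvOuterA, hA, if_neg h]
        rw [ih _ _ _ hlen]
        by_cases hc : cur > maxl
        · rw [if_pos hc]; omega
        · rw [if_neg hc]; omega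

-- the three literals, as replicates
theorem toList_Y : ("Y" : String).toList = List.replicate 1 'Y' := by decide
theorem toList_Y4 : ("YYYY" : String).toList = List.replicate 4 'Y' := by decide
theorem toList_Y8 : ("YYYYYYYY" : String).toList = List.replicate 8 'Y' := by decide

-- ===== VERDICT (by name: the statement is the Claim_ definition above) =====
theorem calDPDScore_spec : Claim_equal_calDPDScore := by
  unfold Claim_equal_calDPDScore
  intro s _
  unfold Spec_calDPDScore calDPDScore calDPDScore_alt
  have hM := pvOuterA_h s.toList.length s.toList 0 0 le_rfl
  have hge := hA_ge s.toList 0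
  have h1 : PySem.Str.isIn "Y" s = true ↔ (1 : Int) ≤ hA s.toList 0 := by
    rw [PySem.Str.isIn_iff_infix, toList_Y, infix_replicate_iff_hA s.toList 1 le_rfl]
    norm_num
  have h4 : PySem.Str.isIn "YYYY" s = true ↔ (4 : Int) ≤ hA s.toList 0 := by
    rw [PySem.Str.isIn_iff_infix, toList_Y4,
      infix_replicate_iff_hA s.toList 4 (by omega)]
    norm_num
  have h8 : PySem.Str.isIn "YYYYYYYY" s = true ↔ (8 : Int) ≤ hA s.toList 0 := by
    rw [PySem.Str.isIn_iff_infix, toList_Y8,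
      infix_replicate_iff_hA s.toList 8 (by omega)]
    norm_num
  simp only [hM]
  have hmax : max (0 : Int) (hA s.toList 0) = hA s.toList 0 := by omega
  rw [hmax]
  have b1 : PySem.Str.isIn "Y" s = decide ((1 : Int) ≤ hA s.toList 0) := by
    rcases Bool.eq_false_or_eq_true (PySem.Str.isIn "Y" s) with hb | hb <;>
      rw [hb] at h1 ⊢ <;> simp_all
  have b4 : PySem.Str.isIn "YYYY" s = decide ((4 : Int) ≤ hA s.toList 0) := by
    rcases Bool.eq_false_or_eq_true (PySem.Str.isIn "YYYY" s) with hb | hb <;>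
      rw [hb] at h4 ⊢ <;> simp_all
  have b8 : PySem.Str.isIn "YYYYYYYY" s = decide ((8 : Int) ≤ hA s.toList 0) := by
    rcases Bool.eq_false_or_eq_true (PySem.Str.isIn "YYYYYYYY" s) with hb | hb <;>
      rw [hb] at h8 ⊢ <;> simp_all
  rw [b1, b4, b8]
  split_ifs <;>
    first
      | rfl
      | (exfalso; simp only [decide_eq_true_eq, decide_eq_false_iff_not] at *; omega)
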